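-- pv_equiv track=rewrite | github.com/co1dspring/share | size_position_conversation.py | is_category_unique
-- ===== SOURCE A (Python) =====
-- def is_category_unique(item, valid_items):
--     # 获取目标item的category
--     target_category = item.get('category')
--
--     # 统计valid_items中相同category的item数量
--     count = 0
--     for valid_item in valid_items:
--         if valid_item.get('category') == target_category:
--             count += 1
--             if count > 1:
--                 return False  # 提前终止，优化性能
--
--     return count == 1
-- ===== SOURCE B (Python) =====
-- def is_category_unique(item, valid_items):
--     target = item.get('category')
--     cats = [v.get('category') for v in valid_items]
--     try:
--         first = cats.index(target)
--     except ValueError: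
--         return False
--     return target not in cats[first + 1:]
-- ===== Notes on version B (the rewrite author's own statement) =====
-- stated objective: alternative
-- what changed: B keeps no count at all: it extracts the category list, locates the first occurrence of the target with list.index, and answers by testing that the target is absent from the slice after that index, instead of A's scan with a mutable counter and count==1 test.
import Mathlib
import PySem

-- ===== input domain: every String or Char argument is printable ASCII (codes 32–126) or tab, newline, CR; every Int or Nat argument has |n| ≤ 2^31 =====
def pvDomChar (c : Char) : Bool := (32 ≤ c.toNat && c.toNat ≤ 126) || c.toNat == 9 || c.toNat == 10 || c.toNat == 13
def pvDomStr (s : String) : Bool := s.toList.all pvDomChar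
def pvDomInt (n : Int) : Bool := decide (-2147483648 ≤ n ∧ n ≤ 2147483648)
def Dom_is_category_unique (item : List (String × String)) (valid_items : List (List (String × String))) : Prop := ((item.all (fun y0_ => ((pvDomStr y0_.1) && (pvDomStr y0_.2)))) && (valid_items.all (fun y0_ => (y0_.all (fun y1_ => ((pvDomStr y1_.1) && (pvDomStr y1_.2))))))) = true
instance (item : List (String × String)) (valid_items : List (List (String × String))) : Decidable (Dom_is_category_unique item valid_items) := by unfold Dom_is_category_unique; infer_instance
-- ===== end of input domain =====

-- B (alternative, same cost): finds the first index of the target category and checks it does not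
-- reappear in the tail slice, instead of A's counter-with-early-exit scan. Return values only.
-- ===== PORT A =====
-- dict.get('category') on an insertion-ordered dict = first-match lookup on the assoc list
def pvLoopA (target : Option String) : List (List (String × String)) → Int → Bool
  | [], count => count == 1
  | v :: rest, count =>
    if v.lookup "category" == target then
      (if count + 1 > 1 then false else pvLoopA target rest (count + 1))
    else pvLoopA target rest count

def is_category_unique (item : List (String × String)) (valid_items : List (List (String × String))) : Bool :=
  pvLoopA (item.lookup "category") valid_items 0

-- ===== PORT B =====
def is_category_unique_alt (item : List (String × String)) (valid_items : List (List (String × String))) : Bool :=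
  let target := item.lookup "category"
  let cats := valid_items.map (fun v => v.lookup "category")
  match PySem.List.index? cats target with
  | none => false                                  -- cats.index raised ValueError
  | some first => !(PySem.List.slice cats (some ((first : Int) + 1)) none).contains target

-- ===== PRECONDITION & SPEC =====
def Spec_is_category_unique (item : List (String × String)) (valid_items : List (List (String × String))) (out : Bool) : Prop := out = is_category_unique_alt item valid_items
instance (item : List (String × String)) (valid_items : List (List (String × String))) (out : Bool) : Decidable (Spec_is_category_unique item valid_items out) := by unfold Spec_is_category_unique; infer_instance

-- ===== CLAIM (what is proved, stated in full; the proofs are below) =====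
def Claim_equal_is_category_unique : Prop := ∀ (item : List (String × String)) (valid_items : List (List (String × String))), Dom_is_category_unique item valid_items → Spec_is_category_unique item valid_items (is_category_unique item valid_items)

-- ===== LEMMAS AND PROOFS =====
-- A's loop computes 'count of target among the categories == 1' (count threaded from 0 or 1).
theorem pvLoopA_eq (t : Option String) (vs : List (List (String × String))) :
    ∀ c : Int, c = 0 ∨ c = 1 →
      pvLoopA t vs c = ((c + ((vs.map (fun v => v.lookup "category")).count t : Int)) == 1) := by
  induction vs with
  | nil => intro c _; simp [pvLoopA]
  | cons v rest ih =>
    intro c hc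
    simp only [pvLoopA, List.map_cons, List.count_cons]
    by_cases h : v.lookup "category" == t
    · simp only [h, if_true]
      rcases hc with rfl | rfl
      · rw [if_neg (by norm_num : ¬ ((0:Int) + 1 > 1)), show (0:Int) + 1 = 1 from by norm_num,
          ih 1 (Or.inr rfl)]
        congr 1
        push_cast
        omega
      · rw [if_pos (by norm_num : (1:Int) + 1 > 1)]
        symm
        rw [beq_eq_false_iff_ne]
        push_cast
        omega
    · simp only [if_neg (by exact h : ¬ (v.lookup "category" == t) = true)]
      rw [ih c hc]
      congr 2

-- 'count == 1' coincides with 'first occurrence exists and target absent after it'.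
theorem count_one_eq_index_no_repeat (t : Option String) (cats : List (Option String)) :
    ((cats.count t : Int) == 1) =
      (match PySem.List.index? cats t with
       | none => false
       | some first => !(cats.drop (first + 1)).contains t) := by
  induction cats with
  | nil =>
    rw [(PySem.List.index?_eq_none_iff [] t).mpr (List.not_mem_nil)]
    simp
  | cons c cs ih =>
    by_cases h : c = t
    · subst h
      rw [PySem.List.index?_cons_self]
      simp only [List.count_cons_self, List.drop_succ_cons, List.drop_zero]
      rw [Bool.eq_iff_iff]
      simp only [beq_iff_eq, Bool.not_eq_true', List.contains_eq_mem, decide_eq_false_iff_not,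
        ← List.count_eq_zero]
      push_cast
      omega
    · rw [List.count_cons_of_ne h, PySem.List.index?_cons_of_ne cs h, ih]
      cases PySem.List.index? cs t with
      | none => rfl
      | some j => simp only [Option.map_some, List.drop_succ_cons]

theorem is_category_unique_spec : Claim_equal_is_category_unique := by
  intro item valid_items _
  unfold Spec_is_category_unique is_category_unique
  simp only [is_category_unique_alt]
  rw [pvLoopA_eq _ _ 0 (Or.inl rfl), zero_add, count_one_eq_index_no_repeat]
  cases PySem.List.index? (valid_items.map fun v => v.lookup "category") (item.lookup "category") with
  | none => rfl
  | some first =>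
    simp only
    rw [show ((first : Int) + 1) = ((first + 1 : Nat) : Int) from by push_cast; ring,
      PySem.List.slice_from_natCast]
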